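-- pv_equiv track=rewrite | github.com/Jose-Delgadillo/IA_Practica2_Enfoques | Enfoque Probabilidad/Redes Neuronales/0008_Hamming_Hopfield_Hebb_Boltzmann.py | hebb_train
-- ===== SOURCE A (Python) =====
-- def hebb_train(patrones):
--     n = len(patrones[0])
--     W = [[0 for _ in range(n)] for _ in range(n)]
--     for p in patrones:
--         for i in range(n):
--             for j in range(n):
--                 if i != j:
--                     W[i][j] += p[i] * p[j]
--     return W
-- ===== SOURCE B (Python) =====
-- def hebb_train(patrones):
--     n = len(patrones[0])
--     cols = [[p[i] for p in patrones] for i in range(n)]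
--     W = [[0] * n for _ in range(n)]
--     for i in range(n):
--         ci = cols[i]
--         for j in range(i + 1, n):
--             s = sum(x * y for x, y in zip(ci, cols[j]))
--             W[i][j] = s
--             W[j][i] = s
--     return W
-- ===== Notes on version B (the rewrite author's own statement) =====
-- stated objective: faster
-- what changed: Exploits the symmetry W[i][j] = W[j][i]: transposes the patterns into columns once, then iterates only over pairs i < j, computing each column dot product once and writing it into both mirror cells, instead of A's per-pattern accumulation over all ordered (i,j) pairs; roughly half the multiplications and tight inner loops over columns.
-- outside the precondition, e.g. on hebb_train([[2], [-50, 9], [], [9], [0, 0]]): A returns [[0]], B raises IndexError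
import Mathlib
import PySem

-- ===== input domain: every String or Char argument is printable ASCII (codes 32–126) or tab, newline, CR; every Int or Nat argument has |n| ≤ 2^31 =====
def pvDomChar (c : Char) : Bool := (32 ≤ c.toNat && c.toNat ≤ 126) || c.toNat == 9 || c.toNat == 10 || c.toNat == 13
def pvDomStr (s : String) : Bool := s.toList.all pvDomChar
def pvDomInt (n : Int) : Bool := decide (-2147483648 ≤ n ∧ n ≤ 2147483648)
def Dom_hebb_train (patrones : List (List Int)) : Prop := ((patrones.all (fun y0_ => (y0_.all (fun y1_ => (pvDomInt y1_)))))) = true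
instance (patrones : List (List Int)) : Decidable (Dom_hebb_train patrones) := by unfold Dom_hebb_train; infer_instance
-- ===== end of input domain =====

-- B exploits the symmetry of the Hebbian weight matrix: transpose the patterns into
-- columns once, then visit only pairs i < j, computing each dot product once and
-- writing it into both mirror cells; alternative decomposition, about half the work.

-- ===== PORT A =====
-- W[i][j] += d  (Python's in-place update of the nested list)
def pvMod2 (W : List (List Int)) (i j : Nat) (d : Int) : List (List Int) :=
  W.modify i (fun row => row.modify j (fun v => v + d))

-- one iteration of A's outer `for p in patrones` loop
def pvStepA (n : Nat) (W : List (List Int)) (p : List Int) : List (List Int) :=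
  (List.range n).foldl (fun W i =>
    (List.range n).foldl (fun W j =>
      if i ≠ j then pvMod2 W i j (p.getD i 0 * p.getD j 0) else W) W) W

-- p.getD i 0 is exact for p[i] on Pre_ (every row has length ≥ n, indices < n)
def hebb_train (patrones : List (List Int)) : List (List Int) :=
  let n := patrones.headI.length
  patrones.foldl (pvStepA n) (List.replicate n (List.replicate n (0 : Int)))

-- ===== PORT B =====
-- sum(x*y for x, y in zip(xs, ys))
def pvDot (xs ys : List Int) : Int :=
  (xs.zip ys).foldl (fun s xy => s + xy.1 * xy.2) 0

-- W[i][j] = v  (Python's assignment into the nested list)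
def pvSet2 (W : List (List Int)) (i j : Nat) (v : Int) : List (List Int) :=
  W.modify i (fun row => row.set j v)

-- range(i+1, n) on the in-range Nat indices of this loop is List.range' (i+1) (n-(i+1))
def hebb_train_alt (patrones : List (List Int)) : List (List Int) :=
  let n := patrones.headI.length
  let cols := (List.range n).map (fun i => patrones.map (fun p => p.getD i 0))
  (List.range n).foldl (fun W i =>
    (List.range' (i + 1) (n - (i + 1))).foldl (fun W j =>
      let s := pvDot (cols.getD i []) (cols.getD j [])
      pvSet2 (pvSet2 W i j s) j i s) W)
    (List.replicate n (List.replicate n (0 : Int)))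

-- ===== PRECONDITION & SPEC =====
-- Pre_ excludes the inputs on which one of the Pythons raises IndexError: the empty list
-- (both raise on patrones[0]) and ragged lists with a pattern shorter than the first (both
-- raise when n >= 2; when n == 1 A happens never to index p and returns [[0]], while B's
-- transposition naturally raises, so those ragged inputs are excluded too).
def Pre_hebb_train (patrones : List (List Int)) : Prop :=
  patrones ≠ [] ∧ ∀ p ∈ patrones, patrones.headI.length ≤ p.length
instance (patrones : List (List Int)) : Decidable (Pre_hebb_train patrones) := by
  unfold Pre_hebb_train; infer_instance

def pvWitness_hebb_train : List (List Int) := [[1, -1], [-1, 1], [1, 1]]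

def Spec_hebb_train (patrones : List (List Int)) (out : List (List Int)) : Prop :=
  out = hebb_train_alt patrones
instance (patrones : List (List Int)) (out : List (List Int)) : Decidable (Spec_hebb_train patrones out) := by
  unfold Spec_hebb_train; infer_instance

-- ===== CLAIM (what is proved, stated in full; the proofs are below) =====
def Claim_equal_hebb_train : Prop := ∀ (patrones : List (List Int)),
  Dom_hebb_train patrones → Pre_hebb_train patrones →
  Spec_hebb_train patrones (hebb_train patrones)

-- ===== LEMMAS AND PROOFS =====

-- entry (a,b) of the matrix, 0 outside
def pvE (W : List (List Int)) (a b : Nat) : Int := ((W[a]?.getD [])[b]?).getD 0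

-- W is an n × n matrix
def pvShape (n : Nat) (W : List (List Int)) : Prop :=
  W.length = n ∧ ∀ a, a < n → (W[a]?.getD []).length = n

theorem pvShape_mod2 {n : Nat} {W : List (List Int)} (h : pvShape n W) (i j : Nat) (d : Int) :
    pvShape n (pvMod2 W i j d) := by
  obtain ⟨h1, h2⟩ := h
  refine ⟨by simp [pvMod2, h1], fun a ha => ?_⟩
  have := h2 a ha
  simp only [pvMod2, List.getElem?_modify]
  rcases hW : W[a]? with _ | r
  · simp [hW] at this ⊢; omega
  · simp [hW] at this ⊢
    split <;> simp [this]

theorem pvE_mod2 {n : Nat} {W : List (List Int)} (h : pvShape n W) (i j a b : Nat) (d : Int) :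
    pvE (pvMod2 W i j d) a b
      = pvE W a b + (if i = a ∧ j = b ∧ a < n ∧ b < n then d else 0) := by
  obtain ⟨h1, h2⟩ := h
  simp only [pvE, pvMod2, List.getElem?_modify]
  by_cases ha : a < n
  · have hrow := h2 a ha
    rcases hW : W[a]? with _ | r
    · exact absurd (List.getElem?_eq_none_iff.mp hW) (by omega)
    · simp [hW] at hrow ⊢
      by_cases hia : i = a
      · subst hia
        simp only [if_pos rfl, List.getElem?_modify]
        by_cases hjb : j = b
        · subst hjb
          by_cases hbn : j < n
          · rcases hr : r[j]? with _ | v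
            · exact absurd (List.getElem?_eq_none_iff.mp hr) (by omega)
            · simp [hr, ha, hbn]
          · have : r[j]? = none := List.getElem?_eq_none_iff.mpr (by omega)
            simp [this, hbn]
        · simp [hjb]
      · simp [hia]
  · have : W[a]? = none := List.getElem?_eq_none_iff.mpr (by omega)
    simp [this, ha]

theorem pvShape_set2 {n : Nat} {W : List (List Int)} (h : pvShape n W) (i j : Nat) (v : Int) :
    pvShape n (pvSet2 W i j v) := by
  obtain ⟨h1, h2⟩ := h
  refine ⟨by simp [pvSet2, h1], fun a ha => ?_⟩
  have := h2 a ha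
  simp only [pvSet2, List.getElem?_modify]
  rcases hW : W[a]? with _ | r
  · simp [hW] at this ⊢; omega
  · simp [hW] at this ⊢
    split <;> simp [this]

theorem pvE_set2 {n : Nat} {W : List (List Int)} (h : pvShape n W) (i j a b : Nat) (v : Int) :
    pvE (pvSet2 W i j v) a b
      = if i = a ∧ j = b ∧ a < n ∧ b < n then v else pvE W a b := by
  obtain ⟨h1, h2⟩ := h
  simp only [pvE, pvSet2, List.getElem?_modify]
  by_cases ha : a < n
  · have hrow := h2 a ha
    rcases hW : W[a]? with _ | r
    · exact absurd (List.getElem?_eq_none_iff.mp hW) (by omega)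
    · simp [hW] at hrow ⊢
      by_cases hia : i = a
      · subst hia
        simp only [if_pos rfl, List.getElem?_set]
        by_cases hjb : j = b
        · subst hjb
          by_cases hbn : j < n
          · simp [ha, hbn, hrow]
          · simp [hbn, hrow]
        · simp [hjb]
      · simp [hia]
  · have : W[a]? = none := List.getElem?_eq_none_iff.mpr (by omega)
    simp [this, ha]

theorem pvShape_foldl {n : Nat} {β : Type} (step : List (List Int) → β → List (List Int))
    (hstep : ∀ W x, pvShape n W → pvShape n (step W x)) :
    ∀ (L : List β) (W : List (List Int)), pvShape n W → pvShape n (L.foldl step W) := by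
  intro L
  induction L with
  | nil => intro W h; exact h
  | cons x t ih => intro W h; exact ih _ (hstep W x h)

theorem pvShape_inner {n : Nat} (p : List Int) (i : Nat) (L : List Nat)
    {W : List (List Int)} (h : pvShape n W) :
    pvShape n (L.foldl (fun W j =>
      if i ≠ j then pvMod2 W i j (p.getD i 0 * p.getD j 0) else W) W) := by
  refine pvShape_foldl _ (fun W j hW => ?_) L W h
  split
  · exact pvShape_mod2 hW _ _ _
  · exact hW

theorem pvShape_stepA {n : Nat} (p : List Int) {W : List (List Int)} (h : pvShape n W) :
    pvShape n (pvStepA n W p) := by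
  refine pvShape_foldl _ (fun W i hW => ?_) (List.range n) W h
  exact pvShape_inner p i (List.range n) hW

theorem pvE_inner {n : Nat} (p : List Int) (i : Nat) (hi : i < n) :
    ∀ (L : List Nat), L.Nodup → (∀ j ∈ L, j < n) →
    ∀ (W : List (List Int)), pvShape n W → ∀ a b,
    pvE (L.foldl (fun W j =>
        if i ≠ j then pvMod2 W i j (p.getD i 0 * p.getD j 0) else W) W) a b
      = pvE W a b + (if i = a ∧ b ∈ L ∧ b ≠ i then p.getD i 0 * p.getD b 0 else 0) := by
  intro L
  induction L with
  | nil => intro _ _ W _ a b; simp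
  | cons j t ih =>
    intro hnd hlt W hW a b
    have hjn : j < n := hlt j (by simp)
    have hnd' := List.nodup_cons.mp hnd
    simp only [List.foldl_cons]
    set W' := if i ≠ j then pvMod2 W i j (p.getD i 0 * p.getD j 0) else W with hW'def
    have hW' : pvShape n W' := by
      rw [hW'def]; split
      · exact pvShape_mod2 hW _ _ _
      · exact hW
    rw [ih hnd'.2 (fun x hx => hlt x (by simp [hx])) W' hW' a b]
    have hstep : pvE W' a b
        = pvE W a b + (if i = a ∧ j = b ∧ i ≠ j then p.getD i 0 * p.getD j 0 else 0) := by
      rw [hW'def]; split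
      · rw [pvE_mod2 hW]
        by_cases h1 : i = a <;> by_cases h2 : j = b <;>
          simp_all <;> omega
      · simp_all
    rw [hstep]
    by_cases h1 : i = a
    · subst h1
      by_cases h2 : j = b
      · subst h2
        have hbt : j ∉ t := hnd'.1
        by_cases h3 : i = j <;> simp [hbt, h3, Ne, eq_comm] <;> ring
      · by_cases h3 : b ∈ t <;> by_cases h4 : b = i <;>
          simp [h2, h3, h4, Ne.symm h2] <;> first | omega | (intro hx hy; exact absurd hx.symm hy) | ring
    · simp [h1]

theorem pvE_stepA {n : Nat} (p : List Int) {W : List (List Int)} (h : pvShape n W) (a b : Nat) :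
    pvE (pvStepA n W p) a b
      = pvE W a b + (if a < n ∧ b < n ∧ a ≠ b then p.getD a 0 * p.getD b 0 else 0) := by
  unfold pvStepA
  have key : ∀ (L : List Nat), L.Nodup → (∀ i ∈ L, i < n) →
      ∀ (W : List (List Int)), pvShape n W →
      pvE (L.foldl (fun W i => (List.range n).foldl (fun W j =>
          if i ≠ j then pvMod2 W i j (p.getD i 0 * p.getD j 0) else W) W) W) a b
        = pvE W a b + (if a ∈ L ∧ b < n ∧ a ≠ b then p.getD a 0 * p.getD b 0 else 0) := by
    intro L
    induction L with
    | nil => intro _ _ W _; simp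
    | cons i t ih =>
      intro hnd hlt W hW
      have hin : i < n := hlt i (by simp)
      have hnd' := List.nodup_cons.mp hnd
      simp only [List.foldl_cons]
      set W' := (List.range n).foldl (fun W j =>
          if i ≠ j then pvMod2 W i j (p.getD i 0 * p.getD j 0) else W) W with hW'def
      have hW' : pvShape n W' := pvShape_inner p i _ hW
      rw [ih hnd'.2 (fun x hx => hlt x (by simp [hx])) W' hW']
      rw [hW'def, pvE_inner p i hin (List.range n) (List.nodup_range)
        (fun j hj => List.mem_range.mp hj) W hW a b]
      simp only [List.mem_range, List.mem_cons]
      by_cases h1 : i = a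
      · subst h1
        have hit : i ∉ t := hnd'.1
        by_cases h2 : b < n <;> by_cases h3 : b = i <;>
          simp [hit, h2, h3, Ne, eq_comm] <;> try ring
      · by_cases h2 : a ∈ t <;> simp [h1, h2, Ne.symm h1, Ne] <;> ring
  have h2 := key (List.range n) List.nodup_range (fun i hi => List.mem_range.mp hi) W h
  simp only [List.mem_range] at h2
  exact h2

theorem pvE_foldPats {n : Nat} (a b : Nat) :
    ∀ (ps : List (List Int)) (W : List (List Int)), pvShape n W →
    pvE (ps.foldl (pvStepA n) W) a b
      = pvE W a b + (if a < n ∧ b < n ∧ a ≠ b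
          then (ps.map (fun p => p.getD a 0 * p.getD b 0)).sum else 0) := by
  intro ps
  induction ps with
  | nil => intro W _; simp
  | cons p t ih =>
    intro W hW
    simp only [List.foldl_cons]
    rw [ih _ (pvShape_stepA p hW), pvE_stepA p hW a b]
    split <;> simp <;> ring

theorem pvShape_init (n : Nat) : pvShape n (List.replicate n (List.replicate n (0 : Int))) := by
  refine ⟨by simp, fun a ha => ?_⟩
  simp [List.getElem?_replicate, ha]

theorem pvE_init (n : Nat) (a b : Nat) :
    pvE (List.replicate n (List.replicate n (0 : Int))) a b = 0 := by
  simp only [pvE, List.getElem?_replicate]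
  split <;> simp [List.getElem?_replicate] <;> split <;> simp

theorem pvDot_maps (f g : List Int → Int) :
    ∀ (ps : List (List Int)) (s : Int),
    ((ps.map f).zip (ps.map g)).foldl (fun s xy => s + xy.1 * xy.2) s
      = s + (ps.map (fun p => f p * g p)).sum := by
  intro ps
  induction ps with
  | nil => intro s; simp
  | cons p t ih => intro s; simp [ih]; ring

theorem pvE_A (ps : List (List Int)) (a b : Nat) :
    pvE (hebb_train ps) a b
      = (if a < ps.headI.length ∧ b < ps.headI.length ∧ a ≠ b
          then (ps.map (fun p => p.getD a 0 * p.getD b 0)).sum else 0) := by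
  unfold hebb_train
  rw [pvE_foldPats a b ps _ (pvShape_init _), pvE_init]
  simp

theorem pvShape_A (ps : List (List Int)) : pvShape ps.headI.length (hebb_train ps) := by
  unfold hebb_train
  exact pvShape_foldl _ (fun W p h => pvShape_stepA p h) ps _ (pvShape_init _)

-- one outer iteration of B writes every pair {i, j} with i < j < n into both mirror cells
theorem pvE_innerB {n : Nat} (v : Nat → Nat → Int) (i : Nat) :
    ∀ (L : List Nat), L.Nodup → (∀ j ∈ L, i < j ∧ j < n) →
    ∀ (W : List (List Int)), pvShape n W → ∀ a b, a < n → b < n →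
    pvE (L.foldl (fun W j => pvSet2 (pvSet2 W i j (v i j)) j i (v i j)) W) a b
      = if a = i ∧ b ∈ L then v i b
        else if b = i ∧ a ∈ L then v i a
        else pvE W a b := by
  intro L
  induction L with
  | nil => intro _ _ W _ a b _ _; simp
  | cons j t ih =>
    intro hnd hlt W hW a b ha hb
    obtain ⟨hij, hjn⟩ := hlt j (by simp)
    have hnd' := List.nodup_cons.mp hnd
    have hbt : j ∉ t := hnd'.1
    have hti : ∀ x ∈ t, i < x := fun x hx => (hlt x (by simp [hx])).1
    have hit : i ∉ t := fun h => absurd (hti i h) (lt_irrefl i)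
    simp only [List.foldl_cons]
    set W' := pvSet2 (pvSet2 W i j (v i j)) j i (v i j) with hW'def
    have hW1 : pvShape n (pvSet2 W i j (v i j)) := pvShape_set2 hW _ _ _
    have hW' : pvShape n W' := pvShape_set2 hW1 _ _ _
    rw [ih hnd'.2 (fun x hx => hlt x (by simp [hx])) W' hW' a b ha hb]
    have hstep : pvE W' a b
        = if j = a ∧ i = b then v i j
          else if i = a ∧ j = b then v i j
          else pvE W a b := by
      rw [hW'def, pvE_set2 hW1, pvE_set2 hW]
      simp [ha, hb]
    rw [hstep]
    have hji : ¬ j = i := by omega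
    have hij' : ¬ i = j := by omega
    by_cases h1 : a = i
    · by_cases h2 : b = j
      · have h3 : ¬ b = i := by omega
        have h4 : ¬ j = a := by omega
        simp [h1, h2, h3, h4, hbt, hji, hij', hit]
      · by_cases h3 : b ∈ t
        · simp [h1, h3]
        · have h4 : ¬ j = a := by omega
          have h5 : ¬ j = b := fun h => h2 h.symm
          simp [h1, h2, h3, h4, h5, hit, hji, hij']
    · by_cases h2 : b = i
      · by_cases h3 : a = j
        · have h4 : ¬ a = i := by omega
          simp [h2, h3, h4, hbt, hji, hij', hit]
        · by_cases h4 : a ∈ t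
          · have h5 : ¬ j = a := fun h => h3 h.symm
            have h6 : ¬ i = a := fun h => h1 h.symm
            simp [h1, h2, h4, h5, h6, hji, hij', hit]
          · have h5 : ¬ j = a := fun h => h3 h.symm
            have h6 : ¬ i = a := fun h => h1 h.symm
            simp [h1, h2, h3, h4, h5, h6, hji, hij', hit]
      · have h3 : ¬ i = b := fun h => h2 h.symm
        have h4 : ¬ i = a := fun h => h1 h.symm
        simp [h1, h2, h3, h4]

-- the whole of B's double loop: cell (a,b) holds v (min a b) (max a b) once min a b was visited
theorem pvE_outerB {n : Nat} (v : Nat → Nat → Int) :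
    ∀ (L : List Nat), L.Nodup → (∀ i ∈ L, i < n) →
    ∀ (W : List (List Int)), pvShape n W → ∀ a b, a < n → b < n →
    pvE (L.foldl (fun W i =>
        (List.range' (i + 1) (n - (i + 1))).foldl
          (fun W j => pvSet2 (pvSet2 W i j (v i j)) j i (v i j)) W) W) a b
      = if min a b ∈ L ∧ a ≠ b then v (min a b) (max a b) else pvE W a b := by
  intro L
  induction L with
  | nil => intro _ _ W _ a b _ _; simp
  | cons i t ih =>
    intro hnd hlt W hW a b ha hb
    have hin : i < n := hlt i (by simp)
    have hnd' := List.nodup_cons.mp hnd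
    have hit : i ∉ t := hnd'.1
    simp only [List.foldl_cons]
    set W' := (List.range' (i + 1) (n - (i + 1))).foldl
        (fun W j => pvSet2 (pvSet2 W i j (v i j)) j i (v i j)) W with hW'def
    have hmemL : ∀ j, j ∈ List.range' (i + 1) (n - (i + 1)) ↔ i < j ∧ j < n := by
      intro j
      rw [List.mem_range'_1]
      omega
    have hW' : pvShape n W' := by
      rw [hW'def]
      exact pvShape_foldl _ (fun W j hWj => pvShape_set2 (pvShape_set2 hWj _ _ _) _ _ _) _ W hW
    rw [ih hnd'.2 (fun x hx => hlt x (by simp [hx])) W' hW' a b ha hb]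
    have hstep : pvE W' a b
        = if a = i ∧ (i < b ∧ b < n) then v i b
          else if b = i ∧ (i < a ∧ a < n) then v i a
          else pvE W a b := by
      rw [hW'def, pvE_innerB v i _ List.nodup_range' (fun j hj => (hmemL j).mp hj) W hW a b ha hb]
      simp only [hmemL]
    rw [hstep]
    simp only [List.mem_cons]
    rcases Nat.lt_trichotomy a b with hab | hab | hab
    · have hmin : min a b = a := by omega
      have hmax : max a b = b := by omega
      have hne : a ≠ b := by omega
      simp only [hmin, hmax]
      by_cases h2 : a ∈ t
      · simp [h2, hne]
      · by_cases h3 : a = i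
        · have h5 : i < b := by omega
          have h6 : ¬ i = b := by omega
          simp [h2, h3, hb, h5, h6, hit, hne]
        · have h4 : ¬ (b = i ∧ i < a ∧ a < n) := by rintro ⟨rfl, h5, _⟩; omega
          simp [h2, h3, h4, hne]
    · subst hab
      have h3 : ¬ (a = i ∧ i < a ∧ a < n) := by rintro ⟨rfl, h5, _⟩; omega
      simp [h3]
    · have hmin : min a b = b := by omega
      have hmax : max a b = a := by omega
      have hne : a ≠ b := by omega
      simp only [hmin, hmax]
      by_cases h2 : b ∈ t
      · simp [h2, hne]
      · by_cases h3 : b = i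
        · have h4 : ¬ (a = i ∧ i < b ∧ b < n) := by rintro ⟨rfl, h5, _⟩; omega
          have h5 : i < a := by omega
          have h6 : ¬ a = i := by omega
          simp [h2, h3, h4, h5, h6, hit, ha, hne]
        · have h4 : ¬ (a = i ∧ i < b ∧ b < n) := by rintro ⟨_, h5, _⟩; omega
          have h5 : ¬ (b = i ∧ i < a ∧ a < n) := by rintro ⟨h6, _, _⟩; exact h3 h6
          simp [h2, h3, h4, h5, hne]

-- matrices of the same shape with the same entries are equal
theorem pvMat_ext {n : Nat} {X Y : List (List Int)}
    (hX : pvShape n X) (hY : pvShape n Y)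
    (h : ∀ a b, a < n → b < n → pvE X a b = pvE Y a b) : X = Y := by
  apply List.ext_getElem?
  intro a
  by_cases ha : a < n
  · have haX : a < X.length := by rw [hX.1]; exact ha
    have haY : a < Y.length := by rw [hY.1]; exact ha
    rw [List.getElem?_eq_getElem haX, List.getElem?_eq_getElem haY]
    have hrX : (X[a]?.getD []) = X[a] := by simp [List.getElem?_eq_getElem haX]
    have hrY : (Y[a]?.getD []) = Y[a] := by simp [List.getElem?_eq_getElem haY]
    have hlX : (X[a]).length = n := by rw [← hrX]; exact hX.2 a ha
    have hlY : (Y[a]).length = n := by rw [← hrY]; exact hY.2 a ha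
    congr 1
    apply List.ext_getElem?
    intro b
    by_cases hb : b < n
    · have hbX : b < (X[a]).length := by omega
      have hbY : b < (Y[a]).length := by omega
      rw [List.getElem?_eq_getElem hbX, List.getElem?_eq_getElem hbY]
      have := h a b ha hb
      simp only [pvE, hrX, hrY, List.getElem?_eq_getElem hbX, List.getElem?_eq_getElem hbY,
        Option.getD_some] at this
      rw [this]
    · rw [List.getElem?_eq_none_iff.mpr (by rw [hlX]; omega),
        List.getElem?_eq_none_iff.mpr (by rw [hlY]; omega)]
  · rw [List.getElem?_eq_none_iff.mpr (by rw [hX.1]; omega),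
      List.getElem?_eq_none_iff.mpr (by rw [hY.1]; omega)]

-- ===== VERDICT (by name: the statement is the Claim_ definition above) =====
theorem hebb_train_spec : Claim_equal_hebb_train := by
  intro ps _ _
  unfold Spec_hebb_train
  set n := ps.headI.length with hn
  set cols := (List.range n).map (fun i => ps.map (fun p => p.getD i 0)) with hcols
  have colsD : ∀ i, i < n → cols.getD i [] = ps.map (fun p => p.getD i 0) := by
    intro i hi
    simp [hcols, List.getD, hi]
  set v : Nat → Nat → Int := fun i j => pvDot (cols.getD i []) (cols.getD j []) with hv
  have hBdef : hebb_train_alt ps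
      = (List.range n).foldl (fun W i =>
          (List.range' (i + 1) (n - (i + 1))).foldl
            (fun W j => pvSet2 (pvSet2 W i j (v i j)) j i (v i j)) W)
          (List.replicate n (List.replicate n (0 : Int))) := by
    rfl
  have hShapeB : pvShape n (hebb_train_alt ps) := by
    rw [hBdef]
    exact pvShape_foldl _
      (fun W i hW => pvShape_foldl _
        (fun W j hWj => pvShape_set2 (pvShape_set2 hWj _ _ _) _ _ _) _ W hW)
      _ _ (pvShape_init n)
  refine pvMat_ext (pvShape_A ps) hShapeB (fun a b ha hb => ?_)
  have ha' : a < n := ha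
  have hb' : b < n := hb
  rw [pvE_A, hBdef,
    pvE_outerB v (List.range n) List.nodup_range (fun i hi => List.mem_range.mp hi)
      _ (pvShape_init n) a b ha' hb',
    pvE_init]
  by_cases hab : a = b
  · simp [hab]
  · have hmin : min a b < n := by omega
    have hmax : max a b < n := by omega
    rw [if_pos (show a < n ∧ b < n ∧ a ≠ b from ⟨ha', hb', hab⟩),
      if_pos (show min a b ∈ List.range n ∧ a ≠ b from ⟨List.mem_range.mpr hmin, hab⟩)]
    rw [hv]
    simp only [colsD _ hmin, colsD _ hmax]
    rw [pvDot, pvDot_maps]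
    rw [zero_add]
    rcases Nat.le_total a b with h | h
    · have h1 : min a b = a := by omega
      have h2 : max a b = b := by omega
      rw [h1, h2]
    · have h1 : min a b = b := by omega
      have h2 : max a b = a := by omega
      rw [h1, h2]
      congr 1
      apply List.map_congr_left
      intro p _
      ring
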